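-- pv_equiv track=rewrite | github.com/BLNTTRP/CosentinoRepoProg1 | Parcial 2/Mutantes.py | isMutant
-- ===== SOURCE A (Python) =====
-- def isMutant(dna):
--     rows = len(dna)
--     cols = len(dna[0])
--
--     if rows != 6 or cols != 6:
--         return False  # No cumple con la matriz de 6x6
--
--     countMutantSequences = 0
--
--     # Verificar secuencias horizontales
--     for i in range(rows):
--         for j in range(cols - 3):
--             sequence = dna[i][j:j+4]
--             if any(seq in sequence for seq in ["AAAA", "TTTT", "CCCC", "GGGG"]):
--                 countMutantSequences += 1
--
--     # Verificar secuencias verticales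
--     for i in range(rows - 3):
--         for j in range(cols):
--             sequence = ''.join(dna[k][j] for k in range(i, i+4))
--             if any(seq in sequence for seq in ["AAAA", "TTTT", "CCCC", "GGGG"]):
--                 countMutantSequences += 1
--
--     # Verificar secuencias oblicuas
--     for i in range(rows - 3):
--         for j in range(cols - 3):
--             sequence = ''.join(dna[i+k][j+k] for k in range(4))
--             if any(seq in sequence for seq in ["AAAA", "TTTT", "CCCC", "GGGG"]):
--                 countMutantSequences += 1
--
--     return countMutantSequences > 1  # Si se encuentran más de una secuencia, es mutante.
-- ===== SOURCE B (Python) =====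
-- def isMutant(dna):
--     rows = len(dna)
--     cols = len(dna[0])
--
--     if rows != 6 or cols != 6:
--         return False  # must be a 6x6 grid
--
--     # Build every scan-line once: the 6 rows (clipped to the 6x6 window),
--     # the 6 columns, and the 9 down-right diagonal windows of length 4.
--     grid = [row[:6] for row in dna]
--     lines = list(grid)
--     lines += [''.join(row[j] for row in grid) for j in range(6)]
--     lines += [''.join(grid[i + k][j + k] for k in range(4))
--               for i in range(3) for j in range(3)]
--
--     # One uniform pass: count every length-4 window of one repeated base.
--     count = 0
--     for line in lines:
--         for t in range(len(line) - 3):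
--             if line[t] == line[t + 1] == line[t + 2] == line[t + 3] and line[t] in "ATCG":
--                 count += 1
--     return count > 1
-- ===== Notes on version B (the rewrite author's own statement) =====
-- stated objective: alternative
-- what changed: Replaces the three differently-shaped interleaved scans (slice+substring membership for rows, joined strings for columns and diagonals) with a build-then-scan decomposition: construct all 21 scan-lines (rows, columns, length-4 diagonals) once, then one uniform window pass counting runs of four equal bases.
import Mathlib
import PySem

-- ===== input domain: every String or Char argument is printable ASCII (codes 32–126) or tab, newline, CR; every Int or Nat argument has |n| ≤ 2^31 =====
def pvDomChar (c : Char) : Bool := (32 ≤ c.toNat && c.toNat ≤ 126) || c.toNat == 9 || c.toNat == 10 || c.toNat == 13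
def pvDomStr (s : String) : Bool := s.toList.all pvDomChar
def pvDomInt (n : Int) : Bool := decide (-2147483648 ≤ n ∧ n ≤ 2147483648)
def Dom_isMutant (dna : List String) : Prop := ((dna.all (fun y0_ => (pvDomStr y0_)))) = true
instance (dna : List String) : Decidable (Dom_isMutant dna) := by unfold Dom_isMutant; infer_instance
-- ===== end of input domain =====

-- B replaces A's three differently-shaped scans by building all scan-lines once and
-- counting runs of four equal bases in one uniform window pass (objective: alternative).

-- ===== PORT A =====
def mutantSeqs : List String := ["AAAA", "TTTT", "CCCC", "GGGG"]

-- 'any(seq in sequence for seq in ["AAAA","TTTT","CCCC","GGGG"])' on one window string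
def anySeqIn (sequence : List Char) : Bool :=
  mutantSeqs.any (fun seq => PySem.Chars.isIn seq.toList sequence)

def isMutant (dna : List String) : Bool :=
  let rows : Int := dna.length
  let cols : Int := ((PySem.List.pyGet? dna 0).getD "").toList.length
  if rows ≠ 6 ∨ cols ≠ 6 then
    false
  else
    -- horizontal sequences
    let count1 : Int := (PySem.List.pyRange 0 rows 1).foldl (fun acc i =>
      (PySem.List.pyRange 0 (cols - 3) 1).foldl (fun acc j =>
        if anySeqIn (PySem.List.slice (PySem.List.pyGetD dna i "").toList (some j) (some (j + 4)))
        then acc + 1 else acc) acc) 0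
    -- vertical sequences
    let count2 : Int := (PySem.List.pyRange 0 (rows - 3) 1).foldl (fun acc i =>
      (PySem.List.pyRange 0 cols 1).foldl (fun acc j =>
        if anySeqIn ((PySem.List.pyRange i (i + 4) 1).map (fun k =>
          (PySem.List.pyGet? (PySem.List.pyGetD dna k "").toList j).getD ' '))
        then acc + 1 else acc) acc) count1
    -- oblique sequences
    let count3 : Int := (PySem.List.pyRange 0 (rows - 3) 1).foldl (fun acc i =>
      (PySem.List.pyRange 0 (cols - 3) 1).foldl (fun acc j =>
        if anySeqIn ((PySem.List.pyRange 0 4 1).map (fun k =>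
          (PySem.List.pyGet? (PySem.List.pyGetD dna (i + k) "").toList (j + k)).getD ' '))
        then acc + 1 else acc) acc) count2
    decide (count3 > 1)

-- ===== PORT B =====
-- 'line[t] == line[t+1] == line[t+2] == line[t+3] and line[t] in "ATCG"'
def isRun4 (line : List Char) (t : Int) : Bool :=
  ((PySem.List.pyGet? line t).getD ' ' == (PySem.List.pyGet? line (t + 1)).getD ' ' &&
   (PySem.List.pyGet? line (t + 1)).getD ' ' == (PySem.List.pyGet? line (t + 2)).getD ' ' &&
   (PySem.List.pyGet? line (t + 2)).getD ' ' == (PySem.List.pyGet? line (t + 3)).getD ' ') &&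
  PySem.Chars.isIn [(PySem.List.pyGet? line t).getD ' '] "ATCG".toList

def isMutant_alt (dna : List String) : Bool :=
  let rows : Int := dna.length
  let cols : Int := ((PySem.List.pyGet? dna 0).getD "").toList.length
  if rows ≠ 6 ∨ cols ≠ 6 then
    false
  else
    let grid : List (List Char) := dna.map (fun row => PySem.List.slice row.toList none (some 6))
    let lines : List (List Char) :=
      grid ++
      (PySem.List.pyRange 0 6 1).map (fun j =>
        grid.map (fun row => (PySem.List.pyGet? row j).getD ' ')) ++
      (PySem.List.pyRange 0 3 1).flatMap (fun i =>
        (PySem.List.pyRange 0 3 1).map (fun j =>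
          (PySem.List.pyRange 0 4 1).map (fun k =>
            (PySem.List.pyGet? ((PySem.List.pyGet? grid (i + k)).getD []) (j + k)).getD ' ')))
    let count : Int := lines.foldl (fun acc line =>
      (PySem.List.pyRange 0 ((line.length : Int) - 3) 1).foldl (fun acc2 t =>
        if isRun4 line t then acc2 + 1 else acc2) acc) 0
    decide (count > 1)

-- ===== PRECONDITION & SPEC =====
-- Pre_ excludes exactly the inputs on which Python A raises IndexError: the empty list
-- (dna[0]) and 6-row grids whose first row has 6 chars but some row fewer than 6
-- (dna[k][j] in the vertical scan).
def Pre_isMutant (dna : List String) : Prop :=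
  dna ≠ [] ∧ (dna.length = 6 → (dna.headD "").toList.length = 6 → ∀ r ∈ dna, 6 ≤ r.toList.length)
instance (dna : List String) : Decidable (Pre_isMutant dna) := by unfold Pre_isMutant; infer_instance

def pvWitness_isMutant : List String :=
  ["ATCGAT", "ATCGAT", "ATCGAT", "ATCGAT", "ATCGAT", "ATCGAT"]

def Spec_isMutant (dna : List String) (out : Bool) : Prop := out = isMutant_alt dna
instance (dna : List String) (out : Bool) : Decidable (Spec_isMutant dna out) := by unfold Spec_isMutant; infer_instance

-- ===== CLAIM (what is proved, stated in full; the proofs are below) =====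
def Claim_equal_isMutant : Prop := ∀ (dna : List String), Dom_isMutant dna → Pre_isMutant dna → Spec_isMutant dna (isMutant dna)

-- ===== LEMMAS AND PROOFS =====
-- canonical per-window condition: four equal chars, all one of the four bases
def core4 (a b c d : Char) : Bool :=
  (a == b && b == c && c == d) && (a == 'A' || a == 'T' || a == 'C' || a == 'G')

theorem isIn_four (x a b c d : Char) :
    PySem.Chars.isIn [x, x, x, x] [a, b, c, d] = (a == x && b == x && c == x && d == x) := by
  rw [Bool.eq_iff_iff, PySem.Chars.isIn_iff_infix]
  simp only [Bool.and_eq_true, beq_iff_eq]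
  constructor
  · intro h
    have he := h.eq_of_length (by simp)
    simp only [List.cons.injEq, and_true] at he
    obtain ⟨rfl, rfl, rfl, rfl⟩ := he
    simp
  · rintro ⟨⟨⟨rfl, rfl⟩, rfl⟩, rfl⟩
    exact List.infix_refl _

theorem anySeqIn_eq (a b c d : Char) : anySeqIn [a, b, c, d] = core4 a b c d := by
  have hA : ("AAAA" : String).toList = ['A', 'A', 'A', 'A'] := rfl
  have hT : ("TTTT" : String).toList = ['T', 'T', 'T', 'T'] := rfl
  have hC : ("CCCC" : String).toList = ['C', 'C', 'C', 'C'] := rfl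
  have hG : ("GGGG" : String).toList = ['G', 'G', 'G', 'G'] := rfl
  rw [Bool.eq_iff_iff]
  simp only [anySeqIn, mutantSeqs, List.any_cons, List.any_nil, hA, hT, hC, hG, isIn_four,
    core4, Bool.or_false, Bool.or_eq_true, Bool.and_eq_true, beq_iff_eq]
  constructor
  · rintro (⟨⟨⟨rfl, rfl⟩, rfl⟩, rfl⟩ | ⟨⟨⟨rfl, rfl⟩, rfl⟩, rfl⟩ | ⟨⟨⟨rfl, rfl⟩, rfl⟩, rfl⟩ |
      ⟨⟨⟨rfl, rfl⟩, rfl⟩, rfl⟩) <;> decide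
  · rintro ⟨⟨⟨rfl, rfl⟩, rfl⟩, (((rfl | rfl) | rfl) | rfl)⟩ <;> decide

theorem isIn_one (x : Char) :
    PySem.Chars.isIn [x] ("ATCG" : String).toList = (x == 'A' || x == 'T' || x == 'C' || x == 'G') := by
  have h : ("ATCG" : String).toList = ['A', 'T', 'C', 'G'] := rfl
  rw [Bool.eq_iff_iff, PySem.Chars.isIn_iff_infix, h]
  simp only [Bool.or_eq_true, beq_iff_eq]
  constructor
  · intro hinf
    have hm : x ∈ ['A', 'T', 'C', 'G'] := hinf.subset (by simp)
    simp at hm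
    tauto
  · intro hx
    have hm : x ∈ ['A', 'T', 'C', 'G'] := by
      simp
      tauto
    obtain ⟨s, t, heq⟩ := List.append_of_mem hm
    rw [heq]
    exact ⟨s, t, by simp⟩

theorem isRun4_four (a b c d : Char) : isRun4 [a, b, c, d] 0 = core4 a b c d := by
  simp only [isRun4, isIn_one, core4]
  rfl

theorem isRun4_six0 (a b c d e f : Char) : isRun4 [a, b, c, d, e, f] 0 = core4 a b c d := by
  simp only [isRun4, isIn_one, core4]
  rfl

theorem isRun4_six1 (a b c d e f : Char) : isRun4 [a, b, c, d, e, f] 1 = core4 b c d e := by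
  simp only [isRun4, isIn_one, core4]
  rfl

theorem isRun4_six2 (a b c d e f : Char) : isRun4 [a, b, c, d, e, f] 2 = core4 c d e f := by
  simp only [isRun4, isIn_one, core4]
  rfl

theorem exists_six_chars (l : List Char) (h : 6 ≤ l.length) :
    ∃ a b c d e f t, l = a :: b :: c :: d :: e :: f :: t := by
  rcases l with _ | ⟨a, _ | ⟨b, _ | ⟨c, _ | ⟨d, _ | ⟨e, _ | ⟨f, t⟩⟩⟩⟩⟩⟩ <;>
    first
      | exact ⟨a, b, c, d, e, f, t, rfl⟩
      | (simp at h)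

theorem sliceNone4 (a b c d : Char) (t : List Char) :
    PySem.List.slice (a :: b :: c :: d :: t) none (some 4) = [a, b, c, d] := by
  rw [PySem.List.slice_to _ (by norm_num)]
  rfl

theorem sliceNone6 (a b c d e f : Char) (t : List Char) :
    PySem.List.slice (a :: b :: c :: d :: e :: f :: t) none (some 6) = [a, b, c, d, e, f] := by
  rw [PySem.List.slice_to _ (by norm_num)]
  rfl

theorem slice15 (a b c d e f : Char) (t : List Char) :
    PySem.List.slice (a :: b :: c :: d :: e :: f :: t) (some 1) (some 5) = [b, c, d, e] := by
  rw [PySem.List.slice_toNat _ (by norm_num) (by norm_num)]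
  rfl

theorem slice26 (a b c d e f : Char) (t : List Char) :
    PySem.List.slice (a :: b :: c :: d :: e :: f :: t) (some 2) (some 6) = [c, d, e, f] := by
  rw [PySem.List.slice_toNat _ (by norm_num) (by norm_num)]
  rfl

theorem gD0 {α : Type} (x0 x1 x2 x3 x4 x5 : α) (t : List α) (d : α) :
    PySem.List.pyGetD (x0 :: x1 :: x2 :: x3 :: x4 :: x5 :: t) 0 d = x0 := by
  rw [PySem.List.pyGetD_ofNat']
  rfl
theorem gD1 {α : Type} (x0 x1 x2 x3 x4 x5 : α) (t : List α) (d : α) :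
    PySem.List.pyGetD (x0 :: x1 :: x2 :: x3 :: x4 :: x5 :: t) 1 d = x1 := by
  rw [PySem.List.pyGetD_ofNat']
  rfl
theorem gD2 {α : Type} (x0 x1 x2 x3 x4 x5 : α) (t : List α) (d : α) :
    PySem.List.pyGetD (x0 :: x1 :: x2 :: x3 :: x4 :: x5 :: t) 2 d = x2 := by
  rw [PySem.List.pyGetD_ofNat']
  rfl
theorem gD3 {α : Type} (x0 x1 x2 x3 x4 x5 : α) (t : List α) (d : α) :
    PySem.List.pyGetD (x0 :: x1 :: x2 :: x3 :: x4 :: x5 :: t) 3 d = x3 := by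
  rw [PySem.List.pyGetD_ofNat']
  rfl
theorem gD4 {α : Type} (x0 x1 x2 x3 x4 x5 : α) (t : List α) (d : α) :
    PySem.List.pyGetD (x0 :: x1 :: x2 :: x3 :: x4 :: x5 :: t) 4 d = x4 := by
  rw [PySem.List.pyGetD_ofNat']
  rfl
theorem gD5 {α : Type} (x0 x1 x2 x3 x4 x5 : α) (t : List α) (d : α) :
    PySem.List.pyGetD (x0 :: x1 :: x2 :: x3 :: x4 :: x5 :: t) 5 d = x5 := by
  rw [PySem.List.pyGetD_ofNat']
  rfl

theorem gq0 {α : Type} (x0 x1 x2 x3 x4 x5 : α) (t : List α) (d : α) :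
    (PySem.List.pyGet? (x0 :: x1 :: x2 :: x3 :: x4 :: x5 :: t) 0).getD d = x0 := gD0 x0 x1 x2 x3 x4 x5 t d
theorem gq1 {α : Type} (x0 x1 x2 x3 x4 x5 : α) (t : List α) (d : α) :
    (PySem.List.pyGet? (x0 :: x1 :: x2 :: x3 :: x4 :: x5 :: t) 1).getD d = x1 := gD1 x0 x1 x2 x3 x4 x5 t d
theorem gq2 {α : Type} (x0 x1 x2 x3 x4 x5 : α) (t : List α) (d : α) :
    (PySem.List.pyGet? (x0 :: x1 :: x2 :: x3 :: x4 :: x5 :: t) 2).getD d = x2 := gD2 x0 x1 x2 x3 x4 x5 t d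
theorem gq3 {α : Type} (x0 x1 x2 x3 x4 x5 : α) (t : List α) (d : α) :
    (PySem.List.pyGet? (x0 :: x1 :: x2 :: x3 :: x4 :: x5 :: t) 3).getD d = x3 := gD3 x0 x1 x2 x3 x4 x5 t d
theorem gq4 {α : Type} (x0 x1 x2 x3 x4 x5 : α) (t : List α) (d : α) :
    (PySem.List.pyGet? (x0 :: x1 :: x2 :: x3 :: x4 :: x5 :: t) 4).getD d = x4 := gD4 x0 x1 x2 x3 x4 x5 t d
theorem gq5 {α : Type} (x0 x1 x2 x3 x4 x5 : α) (t : List α) (d : α) :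
    (PySem.List.pyGet? (x0 :: x1 :: x2 :: x3 :: x4 :: x5 :: t) 5).getD d = x5 := gD5 x0 x1 x2 x3 x4 x5 t d

-- ===== VERDICT (by name: the statement is the Claim_ definition above) =====
theorem isMutant_spec : Claim_equal_isMutant := by
  intro dna hdom hpre
  unfold Spec_isMutant
  by_cases hg : (((dna.length : Int) ≠ 6) ∨
      ((((PySem.List.pyGet? dna 0).getD "").toList.length : Int) ≠ 6))
  · simp only [isMutant, isMutant_alt]
    rw [if_pos hg, if_pos hg]
  · push_neg at hg
    obtain ⟨hlen, hcols⟩ := hg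
    have hlen6 : dna.length = 6 := by exact_mod_cast hlen
    rcases dna with _ | ⟨r0, _ | ⟨r1, _ | ⟨r2, _ | ⟨r3, _ | ⟨r4, _ | ⟨r5, tl⟩⟩⟩⟩⟩⟩ <;>
      simp only [List.length_nil, List.length_cons] at hlen6 <;> try omega
    have htl : tl = [] := by
      have h0 : tl.length = 0 := by omega
      exact List.length_eq_zero_iff.mp h0
    subst htl
    have hget0 : (PySem.List.pyGet? [r0, r1, r2, r3, r4, r5] 0).getD "" = r0 := rfl
    rw [hget0] at hcols
    have hc6 : r0.toList.length = 6 := by exact_mod_cast hcols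
    have hall := hpre.2 rfl hc6
    obtain ⟨a0, b0, c0, d0, e0, f0, t0, hr0⟩ := exists_six_chars r0.toList (by omega)
    obtain ⟨a1, b1, c1, d1, e1, f1, t1, hr1⟩ := exists_six_chars r1.toList (hall r1 (by simp))
    obtain ⟨a2, b2, c2, d2, e2, f2, t2, hr2⟩ := exists_six_chars r2.toList (hall r2 (by simp))
    obtain ⟨a3, b3, c3, d3, e3, f3, t3, hr3⟩ := exists_six_chars r3.toList (hall r3 (by simp))
    obtain ⟨a4, b4, c4, d4, e4, f4, t4, hr4⟩ := exists_six_chars r4.toList (hall r4 (by simp))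
    obtain ⟨a5, b5, c5, d5, e5, f5, t5, hr5⟩ := exists_six_chars r5.toList (hall r5 (by simp))
    have hc6' := hc6
    rw [hr0] at hc6'
    simp at hc6'
    subst hc6' 
    have hgneg : ¬(((([r0, r1, r2, r3, r4, r5] : List String).length : Int) ≠ 6) ∨
        ((((PySem.List.pyGet? [r0, r1, r2, r3, r4, r5] 0).getD "").toList.length : Int) ≠ 6)) := by
      push_neg
      refine ⟨by norm_num, ?_⟩
      rw [hget0]
      exact_mod_cast hc6
    have hR6 : PySem.List.pyRange 0 6 1 = [0, 1, 2, 3, 4, 5] := by decide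
    have hR3 : PySem.List.pyRange 0 3 1 = [0, 1, 2] := by decide
    have hR4 : PySem.List.pyRange 0 4 1 = [0, 1, 2, 3] := by decide
    have hR15 : PySem.List.pyRange 1 5 1 = [1, 2, 3, 4] := by decide
    have hR26 : PySem.List.pyRange 2 6 1 = [2, 3, 4, 5] := by decide
    have hR1 : PySem.List.pyRange 0 1 1 = [0] := by decide
    simp only [isMutant, isMutant_alt]
    rw [if_neg hgneg, if_neg hgneg]
    simp only [PySem.List.foldl_count_if, PySem.List.foldl_add]
    simp only [List.length_cons, List.length_nil, Nat.reduceAdd, Nat.cast_ofNat,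
      Int.reduceSub, Int.reduceAdd, hr0, hr1, hr2, hr3, hr4, hr5, hR6, hR3, hR4, hR15, hR26,
      gq0, gq1, gq2, gq3, gq4, gq5, gD0, gD1, gD2, gD3, gD4, gD5,
      List.map_cons, List.map_nil, List.flatMap_cons, List.flatMap_nil,
      List.countP_cons, List.countP_nil, PySem.List.slice_zero_start,
      sliceNone4, sliceNone6, slice15, slice26,
      List.sum_cons, List.sum_nil, List.append_nil, List.nil_append,
      List.cons_append, hR1,
      anySeqIn_eq, isRun4_four, isRun4_six0, isRun4_six1, isRun4_six2]
    refine congrArg (fun s : Int => decide (s > 1)) ?_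
    push_cast [apply_ite (fun n : Nat => (n : Int))]
    ring
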